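-- pv_equiv track=rewrite | github.com/Jickx/hexlet-exercices | lists/visualize.py | visualize
-- ===== SOURCE A (Python) =====
-- from collections import Counter
--
-- def visualize(coins, bar_char='₽') -> str:
--     coins_count = {k: v for k, v in sorted(Counter(coins).items())}
--     output = []
--     output_string = ''
--     max_count = max(coins_count.values())
--     for key, count in coins_count.items():
--         output.append(
--             [f'{(bar_char * 2):<2}'] * count
--             + [f'{count:<2}']
--             + ['  '] * (max_count - count)
--         )
--     output = reversed(list(zip(*output)))
--     for line in output:
--         output_string += (' '.join(str(i) for i in line)) + '\n'
--     output_string += '-----------------\n'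
--     output_string += '1  2  3  5  10 20'
--     return output_string
-- ===== SOURCE B (Python) =====
-- from collections import Counter
--
-- def visualize(coins, bar_char='₽') -> str:
--     pairs = sorted(Counter(coins).items())
--     max_count = max(count for _, count in pairs)
--     lines = []
--     for r in range(max_count, -1, -1):
--         cells = []
--         for _, count in pairs:
--             if r < count:
--                 cells.append(f'{bar_char * 2:<2}')
--             elif r == count:
--                 cells.append(f'{count:<2}')
--             else:
--                 cells.append('  ')
--         lines.append(' '.join(cells))
--     return '\n'.join(lines) + '\n-----------------\n1  2  3  5  10 20'
-- ===== Notes on version B (the rewrite author's own statement) =====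
-- stated objective: alternative
-- what changed: B builds each output row directly (top-to-bottom, picking bar/label/blank per key from the row index) instead of A's per-key columns transposed with zip(*...) and reversed.
-- outside the precondition, e.g. on visualize([], 'x'): A raises ValueError, B raises ValueError
import Mathlib
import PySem

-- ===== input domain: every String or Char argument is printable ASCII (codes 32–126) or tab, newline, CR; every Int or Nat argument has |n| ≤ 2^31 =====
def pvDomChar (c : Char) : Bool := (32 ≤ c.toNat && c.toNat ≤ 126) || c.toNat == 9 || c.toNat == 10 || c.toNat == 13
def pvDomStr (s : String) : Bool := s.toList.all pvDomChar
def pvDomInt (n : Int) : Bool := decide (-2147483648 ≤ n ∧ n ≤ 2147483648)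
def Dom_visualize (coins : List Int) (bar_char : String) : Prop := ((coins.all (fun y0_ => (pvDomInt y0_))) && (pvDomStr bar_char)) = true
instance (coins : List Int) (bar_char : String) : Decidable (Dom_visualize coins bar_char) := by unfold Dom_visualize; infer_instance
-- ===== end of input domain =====

-- B renders the bar chart row by row (top to bottom) instead of building per-key
-- columns and transposing them with zip(*…)+reversed; same output, different decomposition.

-- ===== PORT A =====

-- f'{s:<2}' : left-justify to width 2 with spaces
def pvLjust2 (s : List Char) : List Char := s ++ List.replicate (2 - s.length) ' '

-- zip(*ls): stop as soon as some list is exhausted (or there are no lists at all);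
-- fuel = length of the first list is enough, since zip never outputs more rows than that.
def pvZipGo : Nat → List (List (List Char)) → List (List (List Char))
  | 0, _ => []
  | n+1, ls =>
    if ls.isEmpty || ls.any List.isEmpty then []
    else ls.map (fun l => l.headD []) :: pvZipGo n (ls.map List.tail)

def pvZip (ls : List (List (List Char))) : List (List (List Char)) :=
  pvZipGo (ls.headD []).length ls

def visualize (coins : List Int) (bar_char : String) : String :=
  -- coins_count = {k: v for k, v in sorted(Counter(coins).items())}
  let coins_count : PySem.Dict Int Int :=
    (PySem.List.sorted2 (PySem.Dict.counter coins).items (fun p => p.1) (fun p => p.2)).foldl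
      (fun d p => d.insert p.1 p.2) PySem.Dict.empty
  match PySem.List.max? coins_count.values (fun v => v) with
  | none => ""   -- Python: max() of an empty sequence raises ValueError; excluded by Pre_visualize
  | some max_count =>
    let output : List (List (List Char)) := coins_count.items.foldl (fun out kc =>
      out ++ [List.replicate kc.2.toNat (pvLjust2 (bar_char.toList ++ bar_char.toList))
              ++ [pvLjust2 (PySem.Int.toChars kc.2)]
              ++ List.replicate (max_count - kc.2).toNat [' ', ' ']]) []
    let rows := (pvZip output).reverse
    let body := rows.foldl (fun acc line => acc ++ (PySem.Chars.join [' '] line ++ ['\n'])) []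
    String.ofList (body ++ "-----------------\n".toList ++ "1  2  3  5  10 20".toList)

-- ===== PORT B =====

def visualize_alt (coins : List Int) (bar_char : String) : String :=
  let pairs := PySem.List.sorted2 (PySem.Dict.counter coins).items (fun p => p.1) (fun p => p.2)
  match PySem.List.max? (pairs.map (fun p => p.2)) (fun v => v) with
  | none => ""   -- Python: max() of an empty generator raises ValueError; excluded by Pre_visualize
  | some max_count =>
    let lines := (PySem.List.pyRange max_count (-1) (-1)).map (fun r =>
      PySem.Chars.join [' '] (pairs.map (fun kc =>
        if r < kc.2 then pvLjust2 (bar_char.toList ++ bar_char.toList)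
        else if r = kc.2 then pvLjust2 (PySem.Int.toChars kc.2)
        else [' ', ' '])))
    String.ofList (PySem.Chars.join ['\n'] lines ++ "\n-----------------\n1  2  3  5  10 20".toList)

-- ===== PRECONDITION & SPEC =====
-- Pre_ excludes only the empty coin list, on which A (and B) raise ValueError from max().
def Pre_visualize (coins : List Int) (bar_char : String) : Prop := coins ≠ []
instance (coins : List Int) (bar_char : String) : Decidable (Pre_visualize coins bar_char) := by unfold Pre_visualize; infer_instance
def pvWitness_visualize : List Int × String := ([1, 2, 2, 5], "x")

def Spec_visualize (coins : List Int) (bar_char : String) (out : String) : Prop := out = visualize_alt coins bar_char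
instance (coins : List Int) (bar_char : String) (out : String) : Decidable (Spec_visualize coins bar_char out) := by unfold Spec_visualize; infer_instance

-- ===== CLAIM (what is proved, stated in full; the proofs are below) =====
def Claim_equal_visualize : Prop := ∀ (coins : List Int) (bar_char : String), Dom_visualize coins bar_char → Pre_visualize coins bar_char → Spec_visualize coins bar_char (visualize coins bar_char)

-- ===== LEMMAS AND PROOFS =====

-- the column A builds for a pair (key, count)
def pvCol (bar : List Char) (m c : Int) : List (List Char) :=
  List.replicate c.toNat (pvLjust2 (bar ++ bar)) ++ [pvLjust2 (PySem.Int.toChars c)]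
  ++ List.replicate (m - c).toNat [' ', ' ']

lemma pvCol_length (bar : List Char) (m c : Int) (h1 : 0 ≤ c) (h2 : c ≤ m) :
    (pvCol bar m c).length = m.toNat + 1 := by
  simp [pvCol]; omega

lemma pvCol_getD (bar : List Char) (m c : Int) (i : Nat) (hlt : i < m.toNat + 1)
    (h1 : 1 ≤ c) (h2 : c ≤ m) :
    (pvCol bar m c).getD i [] =
      if (i : Int) < c then pvLjust2 (bar ++ bar)
      else if (i : Int) = c then pvLjust2 (PySem.Int.toChars c)
      else [' ', ' '] := by
  unfold pvCol
  rcases lt_trichotomy (i : Int) c with hc | hc | hc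
  · have hi : i < c.toNat := by omega
    rw [List.getD_eq_getElem?_getD, List.append_assoc, List.getElem?_append_left (by simpa using hi)]
    simp [hc, hi]
  · have hi : i = c.toNat := by omega
    rw [List.getD_eq_getElem?_getD, List.append_assoc,
      List.getElem?_append_right (by simp [hi]), hi]
    have h3 : ¬ ((c.toNat : Int) < c) := by omega
    simp [← hc]
  · have hi : c.toNat + 1 ≤ i := by omega
    have h3 : ¬ ((i : Int) < c) := by omega
    have h4 : ¬ ((i : Int) = c) := by omega
    rw [List.getD_eq_getElem?_getD, List.append_assoc,
      List.getElem?_append_right (by simp; omega)]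
    simp only [List.length_replicate, h3, h4, if_false]
    rw [List.getElem?_append_right (by simp; omega)]
    simp only [List.length_singleton]
    rw [List.getElem?_replicate_of_lt (by omega)]; rfl

lemma pvZipGo_eq (n : Nat) (ls : List (List (List Char)))
    (hne : ls ≠ []) (hlen : ∀ l ∈ ls, l.length = n) :
    pvZipGo n ls = (List.range n).map (fun i => ls.map (fun l => l.getD i [])) := by
  induction n generalizing ls with
  | zero => simp [pvZipGo]
  | succ n ih =>
    have hguard : (ls.isEmpty || ls.any List.isEmpty) = false := by
      simp [List.isEmpty_eq_false_iff, hne]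
      intro l hl
      have := hlen l hl
      exact List.ne_nil_of_length_pos (by omega)
    rw [pvZipGo, hguard]
    simp only [Bool.false_eq_true, if_false]
    have htail : ∀ l ∈ ls.map List.tail, l.length = n := by
      intro l hl
      rcases List.mem_map.mp hl with ⟨l', hl', rfl⟩
      have := hlen l' hl'; simp [List.length_tail]; omega
    have hmapne : ls.map List.tail ≠ [] := by simpa using hne
    rw [ih (ls.map List.tail) hmapne htail, List.range_succ_eq_map]
    simp only [List.map_cons, List.map_map]
    congr 1
    · apply List.map_congr_left
      intro l hl
      have := hlen l hl
      rw [List.getD_eq_getElem?_getD, List.getElem?_eq_getElem (by omega)]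
      cases l with
      | nil => simp at this
      | cons a t => simp
    · apply List.map_congr_left
      intro i _
      apply List.map_congr_left
      intro l _
      simp [Function.comp, List.getD_eq_getElem?_getD, List.getElem?_tail]

lemma pvJoin_newline (L : List (List Char)) (hL : L ≠ []) (rest : List Char) :
    PySem.Chars.join ['\n'] L ++ ('\n' :: rest) =
      (L.map (fun l => l ++ ['\n'])).flatten ++ rest := by
  induction L with
  | nil => simp at hL
  | cons x t ih =>
    cases t with
    | nil => simp [PySem.Chars.join_singleton]
    | cons y u =>
      rw [PySem.Chars.join_cons_cons]
      simp only [List.map_cons, List.flatten_cons] at *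
      rw [List.append_assoc, List.append_assoc, ih (by simp)]
      simp

-- ===== VERDICT (by name: the statement is the Claim_ definition above) =====
theorem visualize_spec : Claim_equal_visualize := by
  intro coins bar_char _ hpre
  unfold Spec_visualize visualize visualize_alt
  set P := PySem.List.sorted2 (PySem.Dict.counter coins).items (fun p => p.1) (fun p => p.2) with hP
  have hperm : P.Perm (PySem.Dict.counter coins).items :=
    PySem.List.sorted2_perm _ _ _ _
  have hitems := PySem.Dict.items_counter coins
  have hkeys : (P.map (fun p : Int × Int => p.1)).Nodup := by
    have h1 : (P.map (fun p : Int × Int => p.1)).Perm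
        (((PySem.Dict.counter coins).items).map (fun p : Int × Int => p.1)) :=
      hperm.map _
    refine h1.nodup_iff.mpr ?_
    rw [hitems, List.map_map]
    have h2 : ((fun p : Int × Int => p.1) ∘ fun k => (k, (List.count k coins : Int))) = id := rfl
    rw [h2, List.map_id]
    exact PySem.Set.nodup_ofList coins
  have hPne : P ≠ [] := by
    intro h
    have hlen := hperm.length_eq
    rw [h, hitems] at hlen
    simp only [List.length_nil, List.length_map] at hlen
    rcases coins with _ | ⟨c, cs⟩
    · exact hpre rfl
    · have hc : c ∈ PySem.Set.ofList (c :: cs) := by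
        rw [PySem.Set.mem_ofList]; exact List.mem_cons_self
      have := List.length_pos_of_mem hc
      omega
  have hdict : ((P.foldl (fun d p => d.insert p.1 p.2) PySem.Dict.empty).items) = P := by
    have := PySem.Dict.items_foldl_insert_fresh P (fun p : Int × Int => p.1)
      (fun p : Int × Int => p.2) PySem.Dict.empty
      (fun a _ => PySem.Dict.contains_empty _) hkeys
    simpa using this
  have hvals : ((P.foldl (fun d p => d.insert p.1 p.2) PySem.Dict.empty).values)
      = P.map (fun p => p.2) := by
    simp only [PySem.Dict.values, hdict]
  have hcnt : ∀ p ∈ P, (1 : Int) ≤ p.2 := by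
    intro p hp
    have hp' : p ∈ (PySem.Dict.counter coins).items := hperm.subset hp
    rw [hitems] at hp'
    rcases List.mem_map.mp hp' with ⟨k, hk, rfl⟩
    have hkc : k ∈ coins := (PySem.Set.mem_ofList _ _).mp hk
    have : 0 < coins.count k := List.count_pos_iff.mpr hkc
    simpa using this
  simp only [hvals, hdict]
  cases hmax : PySem.List.max? (P.map fun p => p.2) (fun v => v) with
  | none => rfl
  | some m =>
    dsimp only
    have hle : ∀ p ∈ P, p.2 ≤ m := by
      intro p hp
      exact PySem.List.max?_isMax hmax _ (List.mem_map_of_mem hp)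
    have hm1 : (1 : Int) ≤ m := by
      rcases List.exists_mem_of_ne_nil P hPne with ⟨p, hp⟩
      exact le_trans (hcnt p hp) (hle p hp)
    -- A's output loop is a map of columns
    have hout : P.foldl (fun out kc =>
        out ++ [List.replicate kc.2.toNat (pvLjust2 (bar_char.toList ++ bar_char.toList))
                ++ [pvLjust2 (PySem.Int.toChars kc.2)]
                ++ List.replicate (m - kc.2).toNat [' ', ' ']]) []
        = P.map (fun kc => pvCol bar_char.toList m kc.2) :=
      PySem.List.foldl_append_singleton_eq_map _ P []
    rw [hout]
    set n := m.toNat + 1 with hn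
    have hlen : ∀ l ∈ P.map (fun kc => pvCol bar_char.toList m kc.2), l.length = n := by
      intro l hl
      rcases List.mem_map.mp hl with ⟨kc, hkc, rfl⟩
      exact pvCol_length _ _ _ (by have := hcnt kc hkc; omega) (hle kc hkc)
    have houtne : P.map (fun kc => pvCol bar_char.toList m kc.2) ≠ [] := by
      simpa using hPne
    -- zip(*output) row by row
    have hzip : pvZip (P.map (fun kc => pvCol bar_char.toList m kc.2))
        = (List.range n).map (fun i =>
            (P.map (fun kc => pvCol bar_char.toList m kc.2)).map (fun l => l.getD i [])) := by
      unfold pvZip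
      have hhead : ((P.map (fun kc => pvCol bar_char.toList m kc.2)).headD []).length = n := by
        cases hml : P.map (fun kc => pvCol bar_char.toList m kc.2) with
        | nil => exact absurd hml houtne
        | cons l0 rest =>
          have : l0 ∈ P.map (fun kc => pvCol bar_char.toList m kc.2) := by
            rw [hml]; exact List.mem_cons_self
          simpa using hlen l0 this
      rw [hhead]
      exact pvZipGo_eq n _ houtne hlen
    rw [hzip]
    -- each row of A equals the corresponding row of B
    have hrow : ∀ i ∈ List.range n,
        (P.map (fun kc => pvCol bar_char.toList m kc.2)).map (fun l => l.getD i [])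
        = P.map (fun kc =>
            if (0 + (i : Int)) < kc.2 then pvLjust2 (bar_char.toList ++ bar_char.toList)
            else if (0 + (i : Int)) = kc.2 then pvLjust2 (PySem.Int.toChars kc.2)
            else [' ', ' ']) := by
      intro i hi
      rw [List.map_map]
      apply List.map_congr_left
      intro kc hkc
      have := pvCol_getD bar_char.toList m kc.2 i
        (by simpa [hn] using List.mem_range.mp hi)
        (hcnt kc hkc) (hle kc hkc)
      simpa [Function.comp] using this
    -- B's range(max_count, -1, -1) is the reversed range
    have hrange : PySem.List.pyRange m (-1) (-1)
        = ((List.range n).map (fun k : Nat => (0 : Int) + k)).reverse := by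
      rw [PySem.List.pyRange_neg_one_eq_reverse]
      have h01 : (-1 : Int) + 1 = 0 := by norm_num
      rw [h01, PySem.List.pyRange_one]
      have h02 : (m + 1 - 0).toNat = n := by omega
      rw [h02]
    rw [hrange, List.map_reverse, List.map_map]
    -- A appends '\n' after each line; B joins with '\n' and appends the trailing one
    rw [PySem.List.foldl_append_eq_flatMap
      (fun line => PySem.Chars.join [' '] line ++ ['\n'])]
    have htail : ("\n-----------------\n1  2  3  5  10 20").toList
        = '\n' :: ("-----------------\n".toList ++ "1  2  3  5  10 20".toList) := by rfl
    rw [htail, pvJoin_newline _ (by simp [hn])]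
    rw [List.flatMap_def, List.map_reverse, List.map_reverse]
    simp only [List.nil_append, List.append_assoc]
    congr 2
    congr 1
    congr 1
    rw [List.map_map, List.map_map]
    apply List.map_congr_left
    intro i hi
    simp only [Function.comp]
    rw [hrow i hi]
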